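-- pv_equiv track=rewrite | github.com/jhyeom1545/Backjoon_algorithm_study | 프로그래머스/unrated/181834. l로 만들기/l로 만들기.py | solution
-- ===== SOURCE A (Python) =====
-- def solution(myString):
--     result = []
--
--     for i in myString:
--         if ord(i) < ord("l"):
--             result.append("l")
--         else:
--             result.append(i)
--     return "".join(result)
-- ===== SOURCE B (Python) =====
-- import re
--
-- def solution(myString):
--     return re.sub(r'[\x00-\x6b]', 'l', myString)
-- ===== Notes on version B (the rewrite author's own statement) =====
-- stated objective: idiomatic
-- what changed: Replaces the explicit per-character loop with list accumulator and join by a single regex substitution (character class \x00-\x6b) that maps every character with code point below 108 to the threshold letter in one pass.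
import Mathlib
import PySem

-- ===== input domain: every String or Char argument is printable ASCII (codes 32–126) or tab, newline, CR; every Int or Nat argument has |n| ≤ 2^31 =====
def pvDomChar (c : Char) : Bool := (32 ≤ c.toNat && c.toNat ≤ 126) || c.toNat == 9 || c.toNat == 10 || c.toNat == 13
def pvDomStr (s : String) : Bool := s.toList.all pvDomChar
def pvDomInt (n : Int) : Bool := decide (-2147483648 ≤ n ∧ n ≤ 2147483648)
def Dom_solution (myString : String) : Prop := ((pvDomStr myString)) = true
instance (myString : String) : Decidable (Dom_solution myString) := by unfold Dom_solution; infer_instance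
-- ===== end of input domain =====

-- B replaces A's explicit loop-with-accumulator-and-join by a single whole-string
-- substitution of every character below 'l' with 'l' (regex sub, ported as a char map).

-- ===== PORT A =====
-- loop appending "l" or the char to a list of strings, then "".join
def solution (myString : String) : String :=
  let result : List String :=
    myString.toList.foldl (fun result i =>
      if i.toNat < ('l').toNat then result ++ ["l"] else result ++ [i.toString]) []
  PySem.Str.join "" result

-- ===== PORT B =====
-- re.sub(r'[\x00-\x6b]', 'l', myString): replace each char with code ≤ 0x6b by 'l'
def solution_alt (myString : String) : String :=
  String.ofList (myString.toList.map (fun c => if c.toNat ≤ 0x6b then 'l' else c))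

-- ===== PRECONDITION & SPEC =====
def Spec_solution (myString : String) (out : String) : Prop := out = solution_alt myString
instance (myString : String) (out : String) : Decidable (Spec_solution myString out) := by unfold Spec_solution; infer_instance

-- ===== CLAIM (what is proved, stated in full; the proofs are below) =====
def Claim_equal_solution : Prop := ∀ (myString : String), Dom_solution myString → Spec_solution myString (solution myString)

-- ===== LEMMAS AND PROOFS =====

theorem solution_fold_eq (l : List Char) (acc : List String) :
    l.foldl (fun result i =>
        if i.toNat < ('l').toNat then result ++ ["l"] else result ++ [i.toString]) acc
    = acc ++ l.map (fun c => if c.toNat < ('l').toNat then "l" else c.toString) := by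
  induction l generalizing acc with
  | nil => simp
  | cons c rest ih =>
      simp only [List.foldl_cons, List.map_cons]
      by_cases h : c.toNat < ('l').toNat
      · rw [if_pos h, if_pos h, ih]; simp
      · rw [if_neg h, if_neg h, ih]; simp

theorem solution_map_toList (l : List Char) :
    (l.map (fun c => if c.toNat < ('l').toNat then "l" else c.toString)).map String.toList
    = (l.map (fun c => if c.toNat ≤ 0x6b then 'l' else c)).map ([·]) := by
  induction l with
  | nil => rfl
  | cons c rest ih =>
      have hl : ('l').toNat = 108 := by decide
      simp only [List.map_cons, ih]
      by_cases h : c.toNat < ('l').toNat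
      · have h' : c.toNat ≤ 0x6b := by omega
        rw [if_pos h, if_pos h']
        rfl
      · have h' : ¬ c.toNat ≤ 0x6b := by omega
        rw [if_neg h, if_neg h']
        simp

-- ===== VERDICT (by name: the statement is the Claim_ definition above) =====
theorem solution_spec : Claim_equal_solution := by
  intro s _
  unfold Spec_solution solution solution_alt
  rw [solution_fold_eq, List.nil_append]
  apply String.toList_injective
  rw [PySem.Str.toList_join, solution_map_toList]
  have : ("" : String).toList = [] := rfl
  rw [this, PySem.Chars.join_nil_singletons]
  simp
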